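-- pv_equiv track=rewrite | github.com/songrise/My-study-record-2020 | Python/OJ/20_06/contest192/b2.py | getStrongest
-- ===== SOURCE A (Python) =====
-- from typing import List
--
-- def getStrongest(arr: List[int], k: int) -> List[int]:
--     l = len(arr)
--     mid = sorted(arr)[(l-1)//2]
--     ans = []
--
--     for _ in range(k):
--         max_ = arr[0]
--         for i in range(1, len(arr)):
--             cur = arr[i]
--             if abs(cur-mid) > abs(max_-mid):
--                 max_ = cur
--             elif abs(cur-mid) == abs(max_-mid) and cur > max_:
--                 max_ = cur
--         arr.pop(arr.index(max_))
--         ans.append(max_)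
--     return ans
-- ===== SOURCE B (Python) =====
-- from typing import List
--
-- def getStrongest(arr: List[int], k: int) -> List[int]:
--     s = sorted(arr)
--     n = len(s)
--     mid = s[(n - 1) // 2]
--     i, j = 0, n - 1
--     ans = []
--     for _ in range(k):
--         if abs(s[i] - mid) > abs(s[j] - mid):
--             ans.append(s[i])
--             i += 1
--         else:
--             ans.append(s[j])
--             j -= 1
--     return ans
-- ===== Notes on version B (the rewrite author's own statement) =====
-- stated objective: faster
-- what changed: Instead of k repeated linear scans each followed by list.index/pop, B sorts the array once and picks the k strongest with two pointers moving inward from both ends of the sorted list.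
import Mathlib
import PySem

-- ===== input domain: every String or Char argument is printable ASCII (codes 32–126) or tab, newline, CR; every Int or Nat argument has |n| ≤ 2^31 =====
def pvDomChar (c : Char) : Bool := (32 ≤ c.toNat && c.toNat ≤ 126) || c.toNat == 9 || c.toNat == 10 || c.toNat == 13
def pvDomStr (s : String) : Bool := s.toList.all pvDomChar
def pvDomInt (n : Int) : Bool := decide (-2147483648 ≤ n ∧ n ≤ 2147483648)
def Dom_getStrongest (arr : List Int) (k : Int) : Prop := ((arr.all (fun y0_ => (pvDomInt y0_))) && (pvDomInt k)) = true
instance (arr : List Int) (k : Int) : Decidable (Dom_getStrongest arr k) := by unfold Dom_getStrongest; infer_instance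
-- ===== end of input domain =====

-- B replaces A's k selection scans (each followed by list.index/pop) with one sort and a
-- two-pointer sweep from both ends; A mutates its argument (pop) while B does not, so the
-- equivalence proved here is about the return value only.

-- ===== PORT A =====
-- inner 'for i in range(1, len(arr))' scan, accumulator = max_; iterating over arr[1:] is
-- exact here since arr is not modified inside the scan
def pvArgmax (mid m : Int) : List Int → Int
  | [] => m
  | c :: rest =>
      pvArgmax mid
        (if |c - mid| > |m - mid| then c
         else if |c - mid| = |m - mid| ∧ c > m then c else m) rest

-- 'for _ in range(k)': max_ = scan, arr.pop(arr.index(max_)), ans.append(max_)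
def pvLoopA (mid : Int) : Nat → List Int → List Int → List Int
  | 0, _, ans => ans
  | t + 1, arr, ans =>
      let m := pvArgmax mid (arr.headD 0) arr.tail
      let arr' := ((PySem.List.pop? arr (((PySem.List.index? arr m).getD 0 : Nat) : Int)).getD (0, arr)).2
      pvLoopA mid t arr' (ans ++ [m])

def getStrongest (arr : List Int) (k : Int) : List Int :=
  let l := arr.length
  let mid := (PySem.List.pyGet? (PySem.List.sorted arr (fun x => x) false)
      (PySem.Int.floordiv ((l : Int) - 1) 2)).getD 0
  pvLoopA mid k.toNat arr []

-- ===== PORT B =====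
-- 'for _ in range(k)' two-pointer loop over the sorted list s, indices i (left) and j (right)
def pvLoopB (s : List Int) (mid : Int) : Nat → Int → Int → List Int → List Int
  | 0, _, _, ans => ans
  | t + 1, i, j, ans =>
      let a := (PySem.List.pyGet? s i).getD 0
      let b := (PySem.List.pyGet? s j).getD 0
      if |a - mid| > |b - mid| then pvLoopB s mid t (i + 1) j (ans ++ [a])
      else pvLoopB s mid t i (j - 1) (ans ++ [b])

def getStrongest_alt (arr : List Int) (k : Int) : List Int :=
  let s := PySem.List.sorted arr (fun x => x) false
  let n := s.length
  let mid := (PySem.List.pyGet? s (PySem.Int.floordiv ((n : Int) - 1) 2)).getD 0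
  pvLoopB s mid k.toNat 0 ((n : Int) - 1) []

-- ===== PRECONDITION & SPEC =====
-- A raises IndexError on arr = [] (median lookup / arr[0]) and, when k > len(arr), on the
-- iteration where arr has been emptied; exactly those inputs are excluded.
def Pre_getStrongest (arr : List Int) (k : Int) : Prop := arr ≠ [] ∧ k ≤ arr.length
instance (arr : List Int) (k : Int) : Decidable (Pre_getStrongest arr k) := by
  unfold Pre_getStrongest; infer_instance

def pvWitness_getStrongest : List Int × Int := ([1, 2, 3, 4, 5], 2)

def Spec_getStrongest (arr : List Int) (k : Int) (out : List Int) : Prop := out = getStrongest_alt arr k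
instance (arr : List Int) (k : Int) (out : List Int) : Decidable (Spec_getStrongest arr k out) := by
  unfold Spec_getStrongest; infer_instance

-- ===== CLAIM (what is proved, stated in full; the proofs are below) =====
def Claim_equal_getStrongest : Prop := ∀ (arr : List Int) (k : Int), Dom_getStrongest arr k → Pre_getStrongest arr k → Spec_getStrongest arr k (getStrongest arr k)

-- ===== LEMMAS AND PROOFS =====

-- the strict "strength" order A's scan maximises: farther from mid wins, ties to the larger value
def ltS (mid x y : Int) : Prop := |x - mid| < |y - mid| ∨ (|x - mid| = |y - mid| ∧ x < y)

lemma ltS_trichotomy (mid x y : Int) : ltS mid x y ∨ x = y ∨ ltS mid y x := by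
  unfold ltS
  rcases lt_trichotomy (|x - mid|) (|y - mid|) with h | h | h
  · exact Or.inl (Or.inl h)
  · rcases lt_trichotomy x y with h' | h' | h'
    · exact Or.inl (Or.inr ⟨h, h'⟩)
    · exact Or.inr (Or.inl h')
    · exact Or.inr (Or.inr (Or.inr ⟨h.symm, h'⟩))
  · exact Or.inr (Or.inr (Or.inl h))

-- pvArgmax returns a member of m :: xs that no element of m :: xs strictly beats
lemma pvArgmax_spec (mid : Int) : ∀ (xs : List Int) (m : Int),
    pvArgmax mid m xs ∈ m :: xs ∧ ∀ y ∈ m :: xs, ¬ ltS mid (pvArgmax mid m xs) y := by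
  intro xs
  induction xs with
  | nil =>
      intro m
      refine ⟨List.mem_singleton.mpr rfl, ?_⟩
      intro y hy
      rcases List.mem_singleton.mp hy with rfl
      simp only [pvArgmax]
      unfold ltS; omega
  | cons c rest ih =>
      intro m
      simp only [pvArgmax]
      set m' := (if |c - mid| > |m - mid| then c
                 else if |c - mid| = |m - mid| ∧ c > m then c else m) with hm'
      have hm'cases : m' = c ∨ m' = m := by
        by_cases h1 : |c - mid| > |m - mid| <;> by_cases h2 : |c - mid| = |m - mid| ∧ c > m <;>
          simp [hm', h1, h2]
      have hnotc : ¬ ltS mid m' c := by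
        unfold ltS
        by_cases h1 : |c - mid| > |m - mid|
        · simp [hm', h1]
        · by_cases h2 : |c - mid| = |m - mid| ∧ c > m
          · simp [hm', h1, h2]
          · simp [hm', h1, h2]; omega
      have hnotm : ¬ ltS mid m' m := by
        unfold ltS
        by_cases h1 : |c - mid| > |m - mid|
        · simp [hm', h1]; omega
        · by_cases h2 : |c - mid| = |m - mid| ∧ c > m
          · simp [hm', h1, h2]; omega
          · simp [hm', h1, h2]
      obtain ⟨hmem, hub⟩ := ih m'
      refine ⟨?_, ?_⟩
      · rcases List.mem_cons.mp hmem with h | h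
        · rw [h]
          rcases hm'cases with h' | h' <;> simp [h']
        · simp [h]
      · intro y hy
        have hubm' : ¬ ltS mid (pvArgmax mid m' rest) m' := hub m' List.mem_cons_self
        have htrans : ∀ z, ¬ ltS mid m' z → ¬ ltS mid (pvArgmax mid m' rest) z := by
          intro z hz hcon
          rcases ltS_trichotomy mid (pvArgmax mid m' rest) m' with h | h | h
          · exact hubm' h
          · exact hz (h ▸ hcon)
          · unfold ltS at h hcon hz; omega
        rcases List.mem_cons.mp hy with rfl | hy'
        · exact htrans y hnotm
        · rcases List.mem_cons.mp hy' with rfl | hy''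
          · exact htrans y hnotc
          · exact hub y (List.mem_cons_of_mem _ hy'')

lemma ltS_max_unique {mid x y : Int} {l : List Int}
    (hx : x ∈ l) (hy : y ∈ l)
    (hxu : ∀ z ∈ l, ¬ ltS mid x z) (hyu : ∀ z ∈ l, ¬ ltS mid y z) : x = y := by
  rcases ltS_trichotomy mid x y with h | h | h
  · exact absurd h (hxu y hy)
  · exact h
  · exact absurd h (hyu x hx)

-- the contiguous segment s[i..j] of the sorted list
def seg (s : List Int) (i j : Nat) : List Int := (s.drop i).take (j + 1 - i)

lemma mem_seg_iff {s : List Int} {i j : Nat} (hj : j < s.length) {y : Int} :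
    y ∈ seg s i j ↔ ∃ p, i ≤ p ∧ p ≤ j ∧ ∃ hp : p < s.length, s[p] = y := by
  unfold seg
  constructor
  · intro hy
    obtain ⟨q, hq, hval⟩ := List.getElem_of_mem hy
    have hq' : q < j + 1 - i ∧ q < s.length - i := by
      have := hq
      simp [List.length_take, List.length_drop] at this
      omega
    rw [List.getElem_take, List.getElem_drop] at hval
    exact ⟨i + q, by omega, by omega, by omega, hval⟩
  · rintro ⟨p, hip, hpj, hp, rfl⟩
    have hlen : p - i < ((s.drop i).take (j + 1 - i)).length := by
      simp [List.length_take, List.length_drop]; omega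
    have : ((s.drop i).take (j + 1 - i))[p - i]'hlen = s[p]'hp := by
      rw [List.getElem_take, List.getElem_drop]; congr 1; omega
    rw [← this]
    exact List.getElem_mem _

lemma length_seg {s : List Int} {i j : Nat} (hj : j < s.length) (hij : i ≤ j) :
    (seg s i j).length = j + 1 - i := by
  unfold seg; simp [List.length_take, List.length_drop]; omega

lemma seg_head {s : List Int} {i j : Nat} (hj : j < s.length) (hij : i ≤ j) :
    seg s i j = s[i]'(by omega) :: seg s (i + 1) j := by
  unfold seg
  rw [List.drop_eq_getElem_cons (by omega : i < s.length)]
  have h1 : j + 1 - i = (j + 1 - (i + 1)) + 1 := by omega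
  rw [h1, List.take_succ_cons]

lemma seg_last {s : List Int} {i j : Nat} (hj : j < s.length) (hij : i < j) :
    seg s i j = seg s i (j - 1) ++ [s[j]'hj] := by
  unfold seg
  have h1 : j + 1 - i = (j - 1 + 1 - i) + 1 := by omega
  rw [h1, List.take_succ]
  congr 1
  simp only [List.getElem?_drop]
  rw [List.getElem?_eq_getElem (by omega)]
  simp only [Option.toList_some]
  congr 2
  omega

-- elements of s[i..j] lie between s[i] and s[j] when s is sorted
lemma seg_bounds {s : List Int} (hs : s.Pairwise (· ≤ ·)) {i j : Nat}
    (hj : j < s.length) {y : Int} (hy : y ∈ seg s i j) :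
    s[i]'(by
      rcases (mem_seg_iff hj).mp hy with ⟨p, h1, h2, h3, _⟩; omega) ≤ y ∧ y ≤ s[j]'hj := by
  obtain ⟨p, hip, hpj, hp, rfl⟩ := (mem_seg_iff hj).mp hy
  have hmono := List.pairwise_iff_getElem.mp hs
  constructor
  · rcases Nat.lt_or_ge i p with h | h
    · exact hmono i p (by omega) hp h
    · have : i = p := by omega
      subst this; exact le_refl _
  · rcases Nat.lt_or_ge p j with h | h
    · exact hmono p j hp hj h
    · have : p = j := by omega
      subst this; exact le_refl _

-- the two-pointer choice is an ltS upper bound of the segment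
lemma choice_is_max (mid : Int) {s : List Int} (hs : s.Pairwise (· ≤ ·)) {i j : Nat}
    (hj : j < s.length) (hij : i ≤ j) :
    ∀ y ∈ seg s i j,
      ¬ ltS mid (if |s[i]'(by omega) - mid| > |s[j]'hj - mid| then s[i]'(by omega) else s[j]'hj) y := by
  intro y hy
  obtain ⟨hl, hr⟩ := seg_bounds hs hj hy
  set a := s[i]'(by omega)
  set b := s[j]'hj
  unfold ltS
  by_cases hc : |a - mid| > |b - mid| <;> simp only [hc, if_true, if_false] <;>
  · rcases abs_cases (a - mid) with ⟨ha1, ha2⟩ | ⟨ha1, ha2⟩ <;>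
    rcases abs_cases (b - mid) with ⟨hb1, hb2⟩ | ⟨hb1, hb2⟩ <;>
    rcases abs_cases (y - mid) with ⟨hy1, hy2⟩ | ⟨hy1, hy2⟩ <;>
    (push_neg; omega)

-- one step of A: the scanned maximum is THE ltS-maximum, and popping it erases its value
lemma stepA_max {mid : Int} {arr : List Int} (hne : arr ≠ []) :
    pvArgmax mid (arr.headD 0) arr.tail ∈ arr ∧
      ∀ y ∈ arr, ¬ ltS mid (pvArgmax mid (arr.headD 0) arr.tail) y := by
  obtain ⟨h, tl, rfl⟩ := List.exists_cons_of_ne_nil hne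
  exact pvArgmax_spec mid tl h

lemma stepA_pop {arr : List Int} {m : Int} (hm : m ∈ arr) :
    ((PySem.List.pop? arr (((PySem.List.index? arr m).getD 0 : Nat) : Int)).getD (0, arr)).2
      = arr.erase m := by
  have hidx : PySem.List.index? arr m = List.idxOf? m arr := PySem.List.index?_eq_idxOf? arr m
  obtain ⟨q, hq⟩ := Option.isSome_iff_exists.mp ((PySem.List.index?_isSome_iff arr m).mpr hm)
  obtain ⟨pre, suf, heq, hlen, _⟩ := (PySem.List.index?_eq_some_iff arr m q).mp hq
  have hqlt : q < arr.length := by subst heq; simp [← hlen]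
  rw [hq]
  simp only [Option.getD_some]
  rw [PySem.List.pop?_natCast arr q hqlt]
  simp only [Option.getD_some]
  rw [List.erase_eq_eraseIdx]
  rw [hidx] at hq
  rw [hq]

-- coupling invariant: A on any permutation of the segment s[i..j] equals B's two-pointer loop
lemma loop_eq {s : List Int} (hs : s.Pairwise (· ≤ ·)) (mid : Int) :
    ∀ (t i j : Nat) (arr acc : List Int), j < s.length → i + t ≤ j + 1 →
      arr.Perm (seg s i j) →
      pvLoopA mid t arr acc = pvLoopB s mid t (i : Int) (j : Int) acc := by
  intro t
  induction t with
  | zero => intro i j arr acc _ _ _; simp [pvLoopA, pvLoopB]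
  | succ t ih =>
      intro i j arr acc hj hit hperm
      have hij : i ≤ j := by omega
      have hne : arr ≠ [] := by
        intro h
        have := hperm.length_eq
        rw [h, length_seg hj hij] at this
        simp at this; omega
      have hi : i < s.length := by omega
      obtain ⟨hmmem, hmub⟩ := stepA_max (mid := mid) (arr := arr) hne
      have hcmem : (if |s[i]'hi - mid| > |s[j]'hj - mid| then s[i]'hi else s[j]'hj) ∈ seg s i j := by
        by_cases h : |s[i]'hi - mid| > |s[j]'hj - mid|
        · rw [if_pos h, mem_seg_iff hj]; exact ⟨i, le_refl i, hij, hi, rfl⟩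
        · rw [if_neg h, mem_seg_iff hj]; exact ⟨j, hij, le_refl j, hj, rfl⟩
      have hmec : pvArgmax mid (arr.headD 0) arr.tail
          = (if |s[i]'hi - mid| > |s[j]'hj - mid| then s[i]'hi else s[j]'hj) :=
        ltS_max_unique (l := seg s i j) (hperm.subset hmmem) hcmem
          (fun z hz => hmub z (hperm.mem_iff.mpr hz))
          (fun z hz => choice_is_max mid hs hj hij z hz)
      have hra : (PySem.List.pyGet? s ((i : Nat) : Int)).getD 0 = s[i]'hi := by
        rw [PySem.List.pyGet?_natCast, List.getElem?_eq_getElem hi]; rfl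
      have hrb : (PySem.List.pyGet? s ((j : Nat) : Int)).getD 0 = s[j]'hj := by
        rw [PySem.List.pyGet?_natCast, List.getElem?_eq_getElem hj]; rfl
      simp only [pvLoopA, pvLoopB, hra, hrb]
      rw [stepA_pop hmmem, hmec]
      by_cases hcond : |s[i]'hi - mid| > |s[j]'hj - mid|
      · -- both pick s[i]
        rw [if_pos hcond, if_pos hcond]
        have hperm' : (arr.erase (s[i]'hi)).Perm (seg s (i + 1) j) := by
          have h1 := hperm.erase (s[i]'hi)
          rw [seg_head hj hij, List.erase_cons_head] at h1
          exact h1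
        have := ih (i + 1) j (arr.erase (s[i]'hi)) (acc ++ [s[i]'hi]) hj (by omega) hperm'
        rw [this]
        norm_cast
      · -- both pick s[j]
        rw [if_neg hcond, if_neg hcond]
        rcases Nat.eq_zero_or_pos t with rfl | ht
        · simp [pvLoopA, pvLoopB]
        · have hij' : i < j := by omega
          have hperm' : (arr.erase (s[j]'hj)).Perm (seg s i (j - 1)) := by
            have h1 := hperm.erase (s[j]'hj)
            have h2 : (seg s i j).Perm ((s[j]'hj) :: seg s i (j - 1)) := by
              rw [seg_last hj hij']
              exact List.perm_append_singleton _ _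
            have h3 := h2.erase (s[j]'hj)
            rw [List.erase_cons_head] at h3
            exact h1.trans h3
          have := ih i (j - 1) (arr.erase (s[j]'hj)) (acc ++ [s[j]'hj]) (by omega) (by omega) hperm'
          rw [this, Nat.cast_sub (by omega : 1 ≤ j)]
          norm_num

-- ===== VERDICT (by name: the statement is the Claim_ definition above) =====
theorem getStrongest_spec : Claim_equal_getStrongest := by
  intro arr k _ hpre
  obtain ⟨hne, hk⟩ := hpre
  unfold Spec_getStrongest getStrongest getStrongest_alt
  set s := PySem.List.sorted arr (fun x => x) false with hsdef
  have hlen : s.length = arr.length := PySem.List.length_sorted arr _ _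
  have hpos : 0 < arr.length := List.length_pos_of_ne_nil hne
  have hs : s.Pairwise (· ≤ ·) := by
    have := PySem.List.sorted_pairwise arr (fun x => x)
    simpa using this
  simp only [hlen]
  apply Eq.trans (loop_eq hs _ k.toNat 0 (arr.length - 1) arr []
    (by omega) (by omega) (by
      have := (PySem.List.sorted_perm arr (fun x => x) false).symm
      rw [← hsdef] at this
      have hseg : seg s 0 (arr.length - 1) = s := by
        unfold seg
        simp [hlen]
        omega
      rw [hseg]
      exact this))
  congr 1
  omega
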